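-- pv_equiv track=rewrite | github.com/bretthoffman/case_creator | legacy/test_scripts/evo_to_case_data.py | _route_from_services
-- ===== SOURCE A (Python) =====
-- def _route_from_services(services: list) -> str:
--     """
--     Legacy route family:
--       - 'argen_envision' if service mentions Envision
--       - 'argen_adzir'   if it mentions Adzir/ArgenZ (or 'emax zirconia')
--       - 'regular'       otherwise
--     """
--     route = "regular"
--     for s in services or []:
--         desc = (s.get("description") or s.get("service_description") or "").lower()
--         if "envision" in desc:
--             return "argen_envision"
--         if any(k in desc for k in ["adzir", "argenz", "emax zirconia"]):
--             route = "argen_adzir"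
--     return route
-- ===== SOURCE B (Python) =====
-- def _route_from_services(services: list) -> str:
--     """
--     Legacy route family:
--       - 'argen_envision' if service mentions Envision
--       - 'argen_adzir'   if it mentions Adzir/ArgenZ (or 'emax zirconia')
--       - 'regular'       otherwise
--     """
--     def desc(s):
--         return (s.get("description") or s.get("service_description") or "").lower()
--
--     if any("envision" in desc(s) for s in services or []):
--         return "argen_envision"
--     if any(k in desc(s) for s in services or [] for k in ("adzir", "argenz", "emax zirconia")):
--         return "argen_adzir"
--     return "regular"
-- ===== Notes on version B (the rewrite author's own statement) =====
-- stated objective: simpler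
-- what changed: Replaces the single loop with a mutable route flag and mixed early-return/flag logic by two sequential any() membership scans (envision first, then the adzir keywords), eliminating the accumulator entirely.
import Mathlib
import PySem

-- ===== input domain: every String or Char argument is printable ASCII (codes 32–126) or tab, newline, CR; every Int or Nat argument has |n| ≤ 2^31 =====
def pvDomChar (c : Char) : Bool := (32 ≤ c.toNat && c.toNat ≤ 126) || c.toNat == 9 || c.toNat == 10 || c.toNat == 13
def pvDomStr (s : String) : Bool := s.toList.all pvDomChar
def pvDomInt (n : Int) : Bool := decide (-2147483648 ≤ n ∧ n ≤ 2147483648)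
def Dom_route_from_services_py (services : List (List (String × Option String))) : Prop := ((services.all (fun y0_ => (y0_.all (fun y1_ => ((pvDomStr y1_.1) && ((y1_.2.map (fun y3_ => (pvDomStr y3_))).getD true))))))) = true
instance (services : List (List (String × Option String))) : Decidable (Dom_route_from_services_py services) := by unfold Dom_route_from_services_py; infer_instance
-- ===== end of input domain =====

-- B replaces A's single flag+early-return loop by two sequential any() scans (simpler; no accumulator).

-- ===== PORT A =====
-- Python truthiness chain 'x or fb' for Optional[str] x: falsy = None or "".
def pvOrStrA (o : Option String) (fb : String) : String :=
  match o with
  | some t => if t = "" then fb else t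
  | none => fb

-- desc = (s.get("description") or s.get("service_description") or "").lower()
def pvDescA (s : List (String × Option String)) : String :=
  PySem.Str.lower
    (pvOrStrA ((PySem.Dict.get? (PySem.Dict.mk s) "description").join)
      (pvOrStrA ((PySem.Dict.get? (PySem.Dict.mk s) "service_description").join) ""))

-- A's loop: route flag, early return on "envision" ('services or []' iterates the same list).
def pvRouteLoopA (route : String) : List (List (String × Option String)) → String
  | [] => route
  | s :: rest =>
    let desc := pvDescA s
    if PySem.Str.isIn "envision" desc then "argen_envision"
    else if ["adzir", "argenz", "emax zirconia"].any (fun k => PySem.Str.isIn k desc) then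
      pvRouteLoopA "argen_adzir" rest
    else pvRouteLoopA route rest

def route_from_services_py (services : List (List (String × Option String))) : String :=
  pvRouteLoopA "regular" services

-- ===== PORT B =====
-- B: two sequential lazy scans, no flag (its desc(s) helper is the same expression as A's, shared above).
def route_from_services_py_alt (services : List (List (String × Option String))) : String :=
  if services.any (fun s => PySem.Str.isIn "envision" (pvDescA s)) then "argen_envision"
  else if services.any (fun s =>
      ["adzir", "argenz", "emax zirconia"].any (fun k => PySem.Str.isIn k (pvDescA s))) then
    "argen_adzir"
  else "regular"

-- ===== PRECONDITION & SPEC =====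
def Spec_route_from_services_py (services : List (List (String × Option String))) (out : String) : Prop := out = route_from_services_py_alt services
instance (services : List (List (String × Option String))) (out : String) : Decidable (Spec_route_from_services_py services out) := by unfold Spec_route_from_services_py; infer_instance

-- ===== CLAIM (what is proved, stated in full; the proofs are below) =====
def Claim_equal_route_from_services_py : Prop := ∀ (services : List (List (String × Option String))), Dom_route_from_services_py services → Spec_route_from_services_py services (route_from_services_py services)

-- ===== LEMMAS AND PROOFS =====
-- the two tests A's loop applies to each service, named so proofs keep them opaque
def pvEnvTest (s : List (String × Option String)) : Bool := PySem.Str.isIn "envision" (pvDescA s)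
def pvAdzTest (s : List (String × Option String)) : Bool :=
  ["adzir", "argenz", "emax zirconia"].any (fun k => PySem.Str.isIn k (pvDescA s))

-- A's loop computed in one shot: envision anywhere wins, else the flag records any adzir hit.
theorem pvRouteLoopA_eq (l : List (List (String × Option String))) :
    ∀ route, pvRouteLoopA route l =
      if l.any pvEnvTest then "argen_envision"
      else if l.any pvAdzTest then "argen_adzir"
      else route := by
  induction l with
  | nil => intro route; simp [pvRouteLoopA]
  | cons s rest ih =>
    intro route
    rw [List.any_cons, List.any_cons]
    show (if pvEnvTest s then "argen_envision"
          else if pvAdzTest s then pvRouteLoopA "argen_adzir" rest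
          else pvRouteLoopA route rest) = _
    cases h1 : pvEnvTest s with
    | true => simp only [h1, Bool.true_or, if_true]
    | false =>
      cases h2 : pvAdzTest s with
      | true =>
        simp only [h1, h2, Bool.false_or, Bool.true_or, if_true, Bool.false_eq_true, if_false, ih]
        cases rest.any pvEnvTest <;> cases rest.any pvAdzTest <;> simp
      | false =>
        simp only [h1, h2, Bool.false_or, Bool.false_eq_true, if_false, ih]

-- ===== VERDICT (by name: the statement is the Claim_ definition above) =====
theorem route_from_services_py_spec : Claim_equal_route_from_services_py := by
  intro services _
  show pvRouteLoopA "regular" services = route_from_services_py_alt services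
  rw [pvRouteLoopA_eq]
  rfl
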